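-- pv_equiv track=rewrite | github.com/vrozic/opentitan | hw/ip/sram_ctrl/pre_dev/fault_injection.py | flip_vector
-- ===== SOURCE A (Python) =====
-- def flip_vector(word):
--     temp = word
--     word_out = 0
--     for _ in range(39):
--         bit = temp % 2
--         temp >>= 1
--         word_out <<= 1
--         word_out ^= bit
--     return word_out
-- ===== SOURCE B (Python) =====
-- def flip_vector(word):
--     val = word % (1 << 39)  # exactly the low 39 bits (handles negative words too)
--     s = format(val, '039b')
--     return int(s[::-1], 2)
-- ===== Notes on version B (the rewrite author's own statement) =====
-- stated objective: idiomatic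
-- what changed: Replaces the fixed-length shift/xor bit loop with masking the word to its low bits via modulo a power of two, formatting them as a fixed-width zero-padded binary string, reversing the string and parsing it back in base 2.
import Mathlib
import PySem

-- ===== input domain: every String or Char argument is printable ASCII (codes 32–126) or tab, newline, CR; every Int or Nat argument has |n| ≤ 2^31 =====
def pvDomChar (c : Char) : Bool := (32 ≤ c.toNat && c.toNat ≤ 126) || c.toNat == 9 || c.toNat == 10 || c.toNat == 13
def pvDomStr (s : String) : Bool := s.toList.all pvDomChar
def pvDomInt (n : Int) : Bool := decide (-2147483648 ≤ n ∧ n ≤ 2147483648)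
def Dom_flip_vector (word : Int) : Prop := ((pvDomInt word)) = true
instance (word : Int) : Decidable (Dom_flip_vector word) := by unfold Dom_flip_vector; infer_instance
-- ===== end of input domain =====

-- B replaces A's 39-step shift/xor loop by masking the low 39 bits and reversing their
-- fixed-width binary-string representation (idiomatic; same cost).

-- ===== PORT A =====
def flip_vector (word : Int) : Int :=
  ((PySem.List.pyRange 0 39 1).foldl
    (fun (st : Int × Int) _ =>
      let bit := PySem.Int.mod st.1 2
      let temp := st.1 >>> (1 : Nat)
      let word_out := st.2 <<< (1 : Nat)
      (temp, PySem.Int.bxor word_out bit))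
    (word, 0)).2

-- ===== PORT B =====
-- format(v, 'b') for a nonnegative value: most-significant-first binary digits (exact there)
def binNat (v : Nat) : List Char :=
  if _h : v < 2 then [if v = 1 then '1' else '0']
  else binNat (v / 2) ++ [if v % 2 = 1 then '1' else '0']
decreasing_by omega

-- int(s, 2) for a string of '0'/'1' digits (exact there)
def parseBin (l : List Char) : Int :=
  l.foldl (fun acc c => acc * 2 + (if c = '1' then 1 else 0)) 0

def flip_vector_alt (word : Int) : Int :=
  let val := PySem.Int.mod word ((1 : Int) <<< (39 : Nat))
  -- format(val, '039b'): zero-pad the binary digits of val (0 ≤ val < 2^39) to width 39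
  let s := List.replicate (39 - (binNat val.toNat).length) '0' ++ binNat val.toNat
  -- int(s[::-1], 2)
  parseBin s.reverse

-- ===== PRECONDITION & SPEC =====
def Spec_flip_vector (word : Int) (out : Int) : Prop := out = flip_vector_alt word
instance (word : Int) (out : Int) : Decidable (Spec_flip_vector word out) := by unfold Spec_flip_vector; infer_instance

-- ===== CLAIM (what is proved, stated in full; the proofs are below) =====
def Claim_equal_flip_vector : Prop := ∀ (word : Int), Dom_flip_vector word → Spec_flip_vector word (flip_vector word)

-- ===== LEMMAS AND PROOFS =====

-- the reversal of the low n bits of v, most significant output bit first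
def revbits : Nat → Nat → Nat
  | 0, _ => 0
  | n + 1, v => revbits n (v / 2) + (v % 2) * 2 ^ n

-- A's loop as a fuel recursion on the state (temp, word_out)
def loopA : Nat → Int → Int → Int × Int
  | 0, t, o => (t, o)
  | n + 1, t, o =>
      loopA n (t >>> (1 : Nat)) (PySem.Int.bxor (o <<< (1 : Nat)) (PySem.Int.mod t 2))

lemma foldl_loopA (l : List Int) : ∀ t o : Int,
    (l.foldl
      (fun (st : Int × Int) _ =>
        let bit := PySem.Int.mod st.1 2
        let temp := st.1 >>> (1 : Nat)
        let word_out := st.2 <<< (1 : Nat)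
        (temp, PySem.Int.bxor word_out bit))
      (t, o)) = loopA l.length t o := by
  induction l with
  | nil => intro t o; rfl
  | cons x xs ih => intro t o; simpa [List.foldl, loopA] using ih _ _

lemma xor_two_mul_one (m : Nat) : (2 * m) ^^^ 1 = 2 * m + 1 := by
  apply Nat.eq_of_testBit_eq
  intro i
  cases i with
  | zero => simp
  | succ j => simp [Nat.testBit_add_one]

lemma emod_two_mul_ediv_two (a P : Int) : a % (2 * P) / 2 = a / 2 % P := by
  have h : a / 2 / P = a / (2 * P) := Int.ediv_ediv_of_nonneg (by omega)
  rw [Int.emod_def a (2 * P), Int.emod_def (a / 2) P, ← h]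
  rw [show a - 2 * P * (a / 2 / P) = a + (-(P * (a / 2 / P))) * 2 by ring]
  rw [Int.add_mul_ediv_right _ _ (by omega : (2 : Int) ≠ 0)]
  ring

lemma loopA_spec (n : Nat) : ∀ t o : Int, 0 ≤ o →
    (loopA n t o).2 = o * 2 ^ n + ((revbits n (t % 2 ^ n).toNat : Nat) : Int) := by
  induction n with
  | zero => intro t o ho; simp [loopA, revbits]
  | succ n ih =>
    intro t o ho
    have hb0 : 0 ≤ t % 2 := Int.emod_nonneg t (by omega)
    have hb1 : t % 2 < 2 := Int.emod_lt_of_pos t (by omega)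
    show (loopA n (t >>> (1 : Nat)) (PySem.Int.bxor (o <<< (1 : Nat)) (PySem.Int.mod t 2))).2 = _
    rw [PySem.Int.mod_eq_emod_of_pos (by omega)]
    have hshl : o <<< (1 : Nat) = o * 2 := by rw [Int.shiftLeft_eq]; norm_num
    have hshr : t >>> (1 : Nat) = t / 2 := by rw [Int.shiftRight_eq_div_pow]; norm_num
    have hxor : PySem.Int.bxor (o * 2) (t % 2) = o * 2 + t % 2 := by
      rcases (show t % 2 = 0 ∨ t % 2 = 1 by omega) with h | h <;> rw [h]
      · simp
      · rw [PySem.Int.bxor_of_nonneg (by omega) (by omega)]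
        rw [show (o * 2).toNat = 2 * o.toNat by omega,
            show (1 : Int).toNat = 1 from rfl, xor_two_mul_one]
        omega
    rw [hshl, hshr, hxor, ih (t / 2) (o * 2 + t % 2) (by omega)]
    have hP : (0 : Int) < 2 ^ n := by positivity
    have hkey := emod_two_mul_ediv_two t (2 ^ n)
    have h2 : (2 : Int) * 2 ^ n = 2 ^ (n + 1) := by ring
    rw [h2] at hkey
    have hx : 0 ≤ t % 2 ^ (n + 1) := Int.emod_nonneg t (by positivity)
    have hy : 0 ≤ t / 2 % 2 ^ n := Int.emod_nonneg _ (by positivity)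
    have e1 : (t % 2 ^ (n + 1)).toNat / 2 = (t / 2 % 2 ^ n).toNat := by omega
    have e2 : (t % 2 ^ (n + 1)).toNat % 2 = (t % 2).toNat := by
      have := Int.emod_emod_of_dvd t (⟨2 ^ n, by ring⟩ : (2 : Int) ∣ 2 ^ (n + 1))
      omega
    rw [show revbits (n + 1) ((t % 2 ^ (n + 1)).toNat) =
        revbits n ((t % 2 ^ (n + 1)).toNat / 2) + ((t % 2 ^ (n + 1)).toNat % 2) * 2 ^ n from rfl]
    rw [e1, e2]
    push_cast
    rw [show (((t % 2).toNat : Int)) = t % 2 by omega]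
    ring

lemma A_eq (word : Int) : flip_vector word = ((revbits 39 (word % 2 ^ 39).toNat : Nat) : Int) := by
  unfold flip_vector
  rw [foldl_loopA]
  rw [show (PySem.List.pyRange 0 39 1).length = 39 by decide]
  rw [loopA_spec 39 word 0 le_rfl]
  simp

-- ---- B side ----

lemma foldl_parse_shift (l : List Char) : ∀ a : Int,
    l.foldl (fun acc c => acc * 2 + (if c = '1' then 1 else 0)) a
      = a * 2 ^ l.length + parseBin l := by
  induction l with
  | nil => intro a; simp [parseBin]
  | cons c l ih =>
    intro a
    simp only [List.foldl, List.length_cons, parseBin]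
    rw [ih (a * 2 + if c = '1' then 1 else 0), ih (0 * 2 + if c = '1' then 1 else 0)]
    show _ = _ + (_ * 2 ^ l.length + _)
    ring

lemma parse_append_zeros (l : List Char) (k : Nat) :
    parseBin (l ++ List.replicate k '0') = parseBin l * 2 ^ k := by
  induction k with
  | zero => simp [parseBin]
  | succ k ih =>
    rw [List.replicate_succ' (n := k), ← List.append_assoc]
    show (l ++ List.replicate k '0' ++ ['0']).foldl _ 0 = _
    rw [List.foldl_append]
    have : parseBin (l ++ List.replicate k '0') * 2 + (if '0' = '1' then (1:Int) else 0)
        = parseBin l * 2 ^ (k + 1) := by rw [ih, if_neg (by decide)]; ring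
    simpa [parseBin] using this

lemma len_binNat_pos (v : Nat) : 1 ≤ (binNat v).length := by
  rw [binNat]; split <;> simp

lemma v_lt_pow_len (v : Nat) : v < 2 ^ (binNat v).length := by
  induction v using Nat.strong_induction_on with
  | _ v ih =>
    rw [binNat]; split
    · simp; omega
    · rename_i h
      have hlt := ih (v / 2) (by omega)
      simp only [List.length_append, List.length_singleton]
      have : 2 ^ ((binNat (v / 2)).length + 1) = 2 * 2 ^ (binNat (v / 2)).length := by ring
      omega

lemma len_binNat_le (v n : Nat) (h1 : 1 ≤ n) (h : v < 2 ^ n) : (binNat v).length ≤ n := by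
  induction v using Nat.strong_induction_on generalizing n with
  | _ v ih =>
    rw [binNat]; split
    · simpa using h1
    · rename_i hv
      have hn2 : 2 ≤ n := by
        by_contra hc
        have : n = 1 := by omega
        subst this; omega
      have hp : 2 ^ n = 2 * 2 ^ (n - 1) := by
        rw [← pow_succ']; congr 1; omega
      have hrec := ih (v / 2) (by omega) (n - 1) (by omega) (by omega)
      simp only [List.length_append, List.length_singleton]
      omega

lemma parse_rev_binNat (v : Nat) :
    parseBin (binNat v).reverse = ((revbits (binNat v).length v : Nat) : Int) := by
  induction v using Nat.strong_induction_on with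
  | _ v ih =>
    rw [binNat]; split
    · rename_i h
      interval_cases v <;> simp [parseBin, revbits]
    · rename_i h
      rw [List.reverse_append]
      simp only [List.reverse_singleton, List.singleton_append, List.length_append,
        List.length_singleton]
      show List.foldl _ ((0:Int) * 2 + _) _ = _
      rw [foldl_parse_shift]
      rw [ih (v / 2) (by omega)]
      rw [List.length_reverse]
      rw [show revbits ((binNat (v / 2)).length + 1) v =
          revbits (binNat (v / 2)).length (v / 2) + (v % 2) * 2 ^ (binNat (v / 2)).length from rfl]
      have hd : (if (if v % 2 = 1 then '1' else '0') = '1' then (1:Int) else 0) = ((v % 2 : Nat) : Int) := by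
        rcases (show v % 2 = 0 ∨ v % 2 = 1 by omega) with h2 | h2 <;> rw [h2] <;> decide
      rw [hd]
      push_cast
      ring

lemma revbits_double (m : Nat) : ∀ v : Nat, v < 2 ^ m → revbits (m + 1) v = 2 * revbits m v := by
  induction m with
  | zero =>
    intro v hv
    have : v = 0 := by omega
    subst this; simp [revbits]
  | succ m ih =>
    intro v hv
    have h2 : 2 ^ (m + 1) = 2 * 2 ^ m := by ring
    have := ih (v / 2) (by omega)
    rw [show revbits (m + 1 + 1) v = revbits (m + 1) (v / 2) + (v % 2) * 2 ^ (m + 1) from rfl,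
        show revbits (m + 1) v = revbits m (v / 2) + (v % 2) * 2 ^ m from rfl, this]
    ring

lemma revbits_pad (k m v : Nat) (h : v < 2 ^ m) : revbits (m + k) v = 2 ^ k * revbits m v := by
  induction k with
  | zero => simp
  | succ k ih =>
    have hlt : v < 2 ^ (m + k) := lt_of_lt_of_le h (Nat.pow_le_pow_right (by omega) (by omega))
    rw [show m + (k + 1) = (m + k) + 1 by ring, revbits_double (m + k) v hlt, ih]
    ring

lemma B_eq (word : Int) : flip_vector_alt word = ((revbits 39 (word % 2 ^ 39).toNat : Nat) : Int) := by
  have hsh : (1 : Int) <<< (39 : Nat) = 2 ^ 39 := by rw [Int.shiftLeft_eq]; ring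
  have hm : PySem.Int.mod word ((1 : Int) <<< (39 : Nat)) = word % 2 ^ 39 := by
    rw [hsh, PySem.Int.mod_eq_emod_of_pos (by positivity)]
  have h0 : 0 ≤ word % 2 ^ 39 := Int.emod_nonneg word (by positivity)
  have h1 : word % 2 ^ 39 < 2 ^ 39 := Int.emod_lt_of_pos word (by positivity)
  have hcast : ((2 ^ 39 : Nat) : Int) = 2 ^ 39 := by norm_cast
  set v : Nat := (word % 2 ^ 39).toNat with hv
  have hvlt : v < 2 ^ 39 := by omega
  show parseBin (List.replicate (39 - (binNat (PySem.Int.mod word ((1:Int) <<< (39:Nat))).toNat).length) '0'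
      ++ binNat (PySem.Int.mod word ((1:Int) <<< (39:Nat))).toNat).reverse = _
  rw [hm, ← hv]
  rw [List.reverse_append, List.reverse_replicate, parse_append_zeros, parse_rev_binNat]
  have hL1 : 1 ≤ (binNat v).length := len_binNat_pos v
  have hLle : (binNat v).length ≤ 39 := len_binNat_le v 39 (by omega) hvlt
  have hvL : v < 2 ^ (binNat v).length := v_lt_pow_len v
  have hpad := revbits_pad (39 - (binNat v).length) (binNat v).length v hvL
  rw [show (binNat v).length + (39 - (binNat v).length) = 39 by omega] at hpad
  rw [hpad]
  push_cast
  ring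

-- ===== VERDICT (by name: the statement is the Claim_ definition above) =====
theorem flip_vector_spec : Claim_equal_flip_vector := by
  intro word _
  show flip_vector word = flip_vector_alt word
  rw [A_eq, B_eq]
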